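-- pv_equiv track=rewrite | github.com/vphpersson/abuseipdb_reporter | abuseipdb_reporter/__init__.py | _make_comment
-- ===== SOURCE A (Python) =====
-- from typing import Final
--
-- _COMMENT_SIZE_LIMIT: Final[int] = 1024
--
-- def _make_comment(
--     network_transport_to_port_ranges: dict[str, list[str]],
--     network_transport_to_count: dict[str, int],
--     num_blocks: int
-- ) -> str:
--     """
--     Create a comment about an IP address based on network transport, port range, and occurrence information.
--
--     :param network_transport_to_port_ranges: A mapping between the network transport and the port ranges.
--     :param network_transport_to_count: A mapping between the network transport and the associated number of blocks.
--     :param num_blocks: The total number of blocks observed from the IP address.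
--     :return: A comment based on the provided information.
--     """
--
--     comment_header = (
--             'Unsolicited network traffic.\n'
--             + f'{num_blocks} ' + ('blocks' if num_blocks > 1 else 'block') + ' in the last 24 hours.\n\n'
--     )
--
--     if len(comment_header) > _COMMENT_SIZE_LIMIT:
--         return 'Unsolicited network traffic.'
--
--     comment_body = '\n\n'.join(
--         f'{network_transport} ({network_transport_to_count[network_transport]})\n{",".join(port_ranges)}'
--         for network_transport, port_ranges in network_transport_to_port_ranges.items()
--     )
--
--     if len(comment := (comment_header + comment_body)) > _COMMENT_SIZE_LIMIT:
--         comment_body = '\n'.join(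
--             f'{network_transport} ({network_transport_to_count[network_transport]})'
--             for network_transport, port_ranges in network_transport_to_port_ranges.items()
--         )
--     else:
--         return comment
--
--     if len(comment := (comment_header + comment_body)) > _COMMENT_SIZE_LIMIT:
--         return comment_header
--     else:
--         return comment
-- ===== SOURCE B (Python) =====
-- _COMMENT_SIZE_LIMIT = 1024
--
--
-- def _make_comment(
--     network_transport_to_port_ranges: dict,
--     network_transport_to_count: dict,
--     num_blocks: int
-- ) -> str:
--     comment_header = (
--         'Unsolicited network traffic.\n'
--         + f'{num_blocks} ' + ('blocks' if num_blocks > 1 else 'block') + ' in the last 24 hours.\n\n'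
--     )
--     if len(comment_header) > _COMMENT_SIZE_LIMIT:
--         return 'Unsolicited network traffic.'
--
--     # Arithmetic pass: compute the lengths of both candidate comments without building any body string.
--     n = len(network_transport_to_port_ranges)
--     full_len = len(comment_header) + 2 * max(n - 1, 0)
--     compact_len = len(comment_header) + max(n - 1, 0)
--     for transport, port_ranges in network_transport_to_port_ranges.items():
--         line = len(transport) + len(str(network_transport_to_count[transport])) + 3  # 'transport (count)'
--         compact_len += line
--         full_len += line + 1 + sum(map(len, port_ranges)) + max(len(port_ranges) - 1, 0)
--
--     # Render exactly the one variant the arithmetic selected.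
--     if full_len <= _COMMENT_SIZE_LIMIT:
--         return comment_header + '\n\n'.join(
--             f'{t} ({network_transport_to_count[t]})\n{",".join(p)}'
--             for t, p in network_transport_to_port_ranges.items()
--         )
--     if compact_len <= _COMMENT_SIZE_LIMIT:
--         return comment_header + '\n'.join(
--             f'{t} ({network_transport_to_count[t]})'
--             for t, p in network_transport_to_port_ranges.items()
--         )
--     return comment_header
-- ===== Notes on version B (the rewrite author's own statement) =====
-- stated objective: alternative
-- what changed: Instead of A's build-then-measure cascade (construct each candidate comment string and test its length), B does one arithmetic pass that computes the lengths of both candidate comments from the lengths of the parts and separators, then constructs only the single variant that fits.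
import Mathlib
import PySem

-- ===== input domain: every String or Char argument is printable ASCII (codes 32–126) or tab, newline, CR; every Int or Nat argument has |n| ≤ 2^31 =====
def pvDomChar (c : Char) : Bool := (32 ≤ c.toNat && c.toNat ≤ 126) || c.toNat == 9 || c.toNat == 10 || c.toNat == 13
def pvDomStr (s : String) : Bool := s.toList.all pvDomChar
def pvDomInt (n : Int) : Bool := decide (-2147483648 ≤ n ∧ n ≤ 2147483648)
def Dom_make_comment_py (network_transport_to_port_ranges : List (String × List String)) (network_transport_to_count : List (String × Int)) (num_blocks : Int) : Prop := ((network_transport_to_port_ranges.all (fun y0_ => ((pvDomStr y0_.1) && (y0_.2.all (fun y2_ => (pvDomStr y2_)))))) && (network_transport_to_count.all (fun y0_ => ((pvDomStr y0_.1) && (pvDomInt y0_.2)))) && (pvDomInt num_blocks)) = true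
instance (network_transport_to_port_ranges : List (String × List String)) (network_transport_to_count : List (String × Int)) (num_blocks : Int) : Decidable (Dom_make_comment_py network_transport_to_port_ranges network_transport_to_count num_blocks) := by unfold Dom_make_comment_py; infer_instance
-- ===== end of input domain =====

-- B replaces A's build-then-measure cascade by one arithmetic pass over the entries that computes
-- both candidate lengths, then renders only the variant that fits (alternative; same cost).

-- ===== PORT A =====
-- dict lookup network_transport_to_count[t] is first-match lookup on the assoc list; Pre_ guarantees
-- it succeeds (Python raises KeyError on a missing key, and such inputs are outside Pre_), so the
-- .getD 0 default is never reached inside Pre_.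
def make_comment_py (network_transport_to_port_ranges : List (String × List String)) (network_transport_to_count : List (String × Int)) (num_blocks : Int) : String :=
  let comment_header : String :=
    "Unsolicited network traffic.\n" ++ PySem.Int.toStr num_blocks ++ " "
      ++ (if num_blocks > 1 then "blocks" else "block") ++ " in the last 24 hours.\n\n"
  if PySem.Str.len comment_header > 1024 then "Unsolicited network traffic."
  else
    let comment_body := PySem.Str.join "\n\n" (network_transport_to_port_ranges.map
      (fun p => p.1 ++ " (" ++ PySem.Int.toStr ((network_transport_to_count.lookup p.1).getD 0) ++ ")\n" ++ PySem.Str.join "," p.2))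
    let comment := comment_header ++ comment_body
    if PySem.Str.len comment > 1024 then
      let comment_body := PySem.Str.join "\n" (network_transport_to_port_ranges.map
        (fun p => p.1 ++ " (" ++ PySem.Int.toStr ((network_transport_to_count.lookup p.1).getD 0) ++ ")"))
      let comment := comment_header ++ comment_body
      if PySem.Str.len comment > 1024 then comment_header else comment
    else comment

-- ===== PORT B =====
-- same lookup convention as above: .getD 0 is unreachable inside Pre_.
def make_comment_py_alt (network_transport_to_port_ranges : List (String × List String)) (network_transport_to_count : List (String × Int)) (num_blocks : Int) : String :=
  let comment_header : String :=
    "Unsolicited network traffic.\n" ++ PySem.Int.toStr num_blocks ++ " "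
      ++ (if num_blocks > 1 then "blocks" else "block") ++ " in the last 24 hours.\n\n"
  if PySem.Str.len comment_header > 1024 then "Unsolicited network traffic."
  else
    -- arithmetic pass: lengths of both candidate comments, no body string built
    let n : Int := network_transport_to_port_ranges.length
    let lens : Int × Int := network_transport_to_port_ranges.foldl
      (fun acc p =>
        let line := PySem.Str.len p.1
          + PySem.Str.len (PySem.Int.toStr ((network_transport_to_count.lookup p.1).getD 0)) + 3
        (acc.1 + (line + 1 + (p.2.map PySem.Str.len).sum + max ((p.2.length : Int) - 1) 0),
         acc.2 + line))
      (PySem.Str.len comment_header + 2 * max (n - 1) 0,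
       PySem.Str.len comment_header + max (n - 1) 0)
    -- render exactly the one variant the arithmetic selected
    if lens.1 ≤ 1024 then
      comment_header ++ PySem.Str.join "\n\n" (network_transport_to_port_ranges.map
        (fun p => p.1 ++ " (" ++ PySem.Int.toStr ((network_transport_to_count.lookup p.1).getD 0) ++ ")\n" ++ PySem.Str.join "," p.2))
    else if lens.2 ≤ 1024 then
      comment_header ++ PySem.Str.join "\n" (network_transport_to_port_ranges.map
        (fun p => p.1 ++ " (" ++ PySem.Int.toStr ((network_transport_to_count.lookup p.1).getD 0) ++ ")"))
    else comment_header

-- ===== PRECONDITION & SPEC =====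
-- Pre_ excludes exactly the inputs where Python A raises KeyError: a transport key of the first
-- mapping that is absent from the second mapping (B raises KeyError there too).
def Pre_make_comment_py (network_transport_to_port_ranges : List (String × List String)) (network_transport_to_count : List (String × Int)) (num_blocks : Int) : Prop :=
  ∀ p ∈ network_transport_to_port_ranges, (network_transport_to_count.lookup p.1).isSome
instance (network_transport_to_port_ranges : List (String × List String)) (network_transport_to_count : List (String × Int)) (num_blocks : Int) : Decidable (Pre_make_comment_py network_transport_to_port_ranges network_transport_to_count num_blocks) := by unfold Pre_make_comment_py; infer_instance
def pvWitness_make_comment_py : (List (String × List String)) × (List (String × Int)) × Int := ([("tcp", ["80", "443"])], [("tcp", 2)], 3)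
def Spec_make_comment_py (network_transport_to_port_ranges : List (String × List String)) (network_transport_to_count : List (String × Int)) (num_blocks : Int) (out : String) : Prop := out = make_comment_py_alt network_transport_to_port_ranges network_transport_to_count num_blocks
instance (network_transport_to_port_ranges : List (String × List String)) (network_transport_to_count : List (String × Int)) (num_blocks : Int) (out : String) : Decidable (Spec_make_comment_py network_transport_to_port_ranges network_transport_to_count num_blocks out) := by unfold Spec_make_comment_py; infer_instance

-- ===== CLAIM (what is proved, stated in full; the proofs are below) =====
def Claim_equal_make_comment_py : Prop := ∀ (network_transport_to_port_ranges : List (String × List String)) (network_transport_to_count : List (String × Int)) (num_blocks : Int), Dom_make_comment_py network_transport_to_port_ranges network_transport_to_count num_blocks → Pre_make_comment_py network_transport_to_port_ranges network_transport_to_count num_blocks → Spec_make_comment_py network_transport_to_port_ranges network_transport_to_count num_blocks (make_comment_py network_transport_to_port_ranges network_transport_to_count num_blocks)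

-- ===== LEMMAS AND PROOFS =====
-- length of a separator-join, as B's arithmetic counts it
theorem pvLenJoin (sep : String) (l : List String) :
    PySem.Str.len (PySem.Str.join sep l)
      = (l.map PySem.Str.len).sum + PySem.Str.len sep * max ((l.length : Int) - 1) 0 := by
  simp only [PySem.Str.len_eq, PySem.Str.toList_join]
  induction l with
  | nil => simp [PySem.Chars.join_nil]
  | cons x t ih =>
    cases t with
    | nil => simp [PySem.Chars.join_singleton]
    | cons y r =>
      simp only [List.map_cons] at *
      rw [PySem.Chars.join_cons_cons]
      simp only [List.length_append, List.sum_cons, List.length_cons, PySem.Str.len_eq] at *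
      push_cast at *
      rw [ih]
      have h2 : max (((r.length : Int) + 1) - 1) 0 = (r.length : Int) := by omega
      have h1 : max ((((r.length : Int) + 1 + 1)) - 1) 0 = (r.length : Int) + 1 := by omega
      rw [h2] at *
      rw [h1]; ring

-- B's length fold, in closed form
theorem pvFold (g h : α → Int) (l : List α) (a b : Int) :
    l.foldl (fun acc p => ((acc.1 + g p : Int), (acc.2 + h p : Int))) (a, b)
      = (a + (l.map g).sum, b + (l.map h).sum) := by
  induction l generalizing a b with
  | nil => simp
  | cons x t ih => simp [List.foldl_cons, ih]; constructor <;> ring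

-- ===== VERDICT (by name: the statement is the Claim_ definition above) =====
-- per-entry lengths, as B's arithmetic pass counts them
theorem pvLineFull (ntc : List (String × Int)) (p : String × List String) :
    PySem.Str.len (p.1 ++ " (" ++ PySem.Int.toStr ((ntc.lookup p.1).getD 0) ++ ")\n" ++ PySem.Str.join "," p.2)
      = (PySem.Str.len p.1 + PySem.Str.len (PySem.Int.toStr ((ntc.lookup p.1).getD 0)) + 3)
        + 1 + (p.2.map PySem.Str.len).sum + max ((p.2.length : Int) - 1) 0 := by
  rw [PySem.Str.len_append, PySem.Str.len_append, PySem.Str.len_append, PySem.Str.len_append, pvLenJoin]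
  have h1 : PySem.Str.len " (" = 2 := by rfl
  have h2 : PySem.Str.len ")\n" = 2 := by rfl
  have h3 : PySem.Str.len "," = 1 := by rfl
  rw [h1, h2, h3]; ring

theorem pvLineCompact (ntc : List (String × Int)) (p : String × List String) :
    PySem.Str.len (p.1 ++ " (" ++ PySem.Int.toStr ((ntc.lookup p.1).getD 0) ++ ")")
      = PySem.Str.len p.1 + PySem.Str.len (PySem.Int.toStr ((ntc.lookup p.1).getD 0)) + 3 := by
  rw [PySem.Str.len_append, PySem.Str.len_append, PySem.Str.len_append]
  have h1 : PySem.Str.len " (" = 2 := by rfl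
  have h2 : PySem.Str.len ")" = 1 := by rfl
  rw [h1, h2]; ring

theorem make_comment_py_spec : Claim_equal_make_comment_py := by
  intro ntpr ntc nb _ _
  unfold Spec_make_comment_py make_comment_py make_comment_py_alt
  simp only []
  by_cases hH : PySem.Str.len ("Unsolicited network traffic.\n" ++ PySem.Int.toStr nb ++ " "
      ++ (if nb > 1 then "blocks" else "block") ++ " in the last 24 hours.\n\n") > 1024
  · rw [if_pos hH, if_pos hH]
  · rw [if_neg hH, if_neg hH]
    rw [pvFold]
    have hfull : PySem.Str.len
        (("Unsolicited network traffic.\n" ++ PySem.Int.toStr nb ++ " "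
          ++ (if nb > 1 then "blocks" else "block") ++ " in the last 24 hours.\n\n")
         ++ PySem.Str.join "\n\n" (ntpr.map
            (fun p => p.1 ++ " (" ++ PySem.Int.toStr ((ntc.lookup p.1).getD 0) ++ ")\n" ++ PySem.Str.join "," p.2)))
        = PySem.Str.len ("Unsolicited network traffic.\n" ++ PySem.Int.toStr nb ++ " "
          ++ (if nb > 1 then "blocks" else "block") ++ " in the last 24 hours.\n\n")
          + 2 * max ((ntpr.length : Int) - 1) 0
          + (ntpr.map (fun p => (PySem.Str.len p.1
              + PySem.Str.len (PySem.Int.toStr ((ntc.lookup p.1).getD 0)) + 3)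
              + 1 + (p.2.map PySem.Str.len).sum + max ((p.2.length : Int) - 1) 0)).sum := by
      rw [PySem.Str.len_append, pvLenJoin, List.map_map]
      have hsep : PySem.Str.len "\n\n" = 2 := by rfl
      rw [hsep]
      have : (PySem.Str.len ∘ fun p : String × List String =>
          p.1 ++ " (" ++ PySem.Int.toStr ((ntc.lookup p.1).getD 0) ++ ")\n" ++ PySem.Str.join "," p.2)
          = fun p : String × List String => (PySem.Str.len p.1
              + PySem.Str.len (PySem.Int.toStr ((ntc.lookup p.1).getD 0)) + 3)
              + 1 + (p.2.map PySem.Str.len).sum + max ((p.2.length : Int) - 1) 0 :=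
        funext fun p => pvLineFull ntc p
      rw [this]; simp only [List.length_map]; ring
    have hcompact : PySem.Str.len
        (("Unsolicited network traffic.\n" ++ PySem.Int.toStr nb ++ " "
          ++ (if nb > 1 then "blocks" else "block") ++ " in the last 24 hours.\n\n")
         ++ PySem.Str.join "\n" (ntpr.map
            (fun p => p.1 ++ " (" ++ PySem.Int.toStr ((ntc.lookup p.1).getD 0) ++ ")")))
        = PySem.Str.len ("Unsolicited network traffic.\n" ++ PySem.Int.toStr nb ++ " "
          ++ (if nb > 1 then "blocks" else "block") ++ " in the last 24 hours.\n\n")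
          + max ((ntpr.length : Int) - 1) 0
          + (ntpr.map (fun p => PySem.Str.len p.1
              + PySem.Str.len (PySem.Int.toStr ((ntc.lookup p.1).getD 0)) + 3)).sum := by
      rw [PySem.Str.len_append, pvLenJoin, List.map_map]
      have hsep : PySem.Str.len "\n" = 1 := by rfl
      rw [hsep]
      have : (PySem.Str.len ∘ fun p : String × List String =>
          p.1 ++ " (" ++ PySem.Int.toStr ((ntc.lookup p.1).getD 0) ++ ")")
          = fun p : String × List String => PySem.Str.len p.1
              + PySem.Str.len (PySem.Int.toStr ((ntc.lookup p.1).getD 0)) + 3 :=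
        funext fun p => pvLineCompact ntc p
      rw [this]; simp only [List.length_map]; ring
    rw [hfull, hcompact]
    split_ifs <;> first | rfl | omega
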